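-- pv_equiv track=rewrite | github.com/anuar13252/PythonConsoleTasks | Proj3.1/main.py | solve_task
-- ===== SOURCE A (Python) =====
-- def solve_task(array, min_elem):
--     for i in range(len(array)):
--         for j in range(len(array[i])):
--             if array[i][1] == min_elem:
--                 for i in range(len(array)):
--                     for j in range(len(array[i])):
--                         array[i][1] = 0
--     return array
-- ===== SOURCE B (Python) =====
-- def solve_task(array, min_elem):
--     # One pass: if any row's column 1 equals min_elem, zero column 1 everywhere.
--     # Mutates `array` in place, like the original.
--     if any(len(row) > 1 and row[1] == min_elem for row in array):
--         for row in array: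
--             if len(row) > 1:
--                 row[1] = 0
--     return array
-- ===== Notes on version B (the rewrite author's own statement) =====
-- stated objective: simpler
-- what changed: Replaced A's quadruply nested index loops (which may re-run the full zeroing pass on every cell check) by a single any() scan plus one zeroing pass over the rows.
import Mathlib
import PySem

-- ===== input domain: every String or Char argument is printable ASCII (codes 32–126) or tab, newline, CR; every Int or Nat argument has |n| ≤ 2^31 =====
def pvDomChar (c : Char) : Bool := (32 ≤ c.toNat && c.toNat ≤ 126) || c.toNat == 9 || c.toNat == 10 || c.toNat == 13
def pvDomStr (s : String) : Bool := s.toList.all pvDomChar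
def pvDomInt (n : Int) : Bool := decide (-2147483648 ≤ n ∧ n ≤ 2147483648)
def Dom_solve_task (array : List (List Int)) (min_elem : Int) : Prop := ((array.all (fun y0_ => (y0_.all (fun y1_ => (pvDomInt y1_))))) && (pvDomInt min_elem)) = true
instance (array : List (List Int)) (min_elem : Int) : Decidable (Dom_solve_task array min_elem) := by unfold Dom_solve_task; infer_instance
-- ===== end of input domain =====

-- B replaces A's quadruply nested index loops by one any() scan and one zeroing pass (simpler);
-- equivalence is about the returned value (both Pythons mutate `array` in place).


-- ===== PORT A =====
-- array[i][1] = 0 (List.set is a no-op where Python would raise; such inputs are outside Pre_)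
def pvSetZero (a : List (List Int)) (i : Nat) : List (List Int) :=
  a.set i ((a.getD i []).set 1 0)

-- the inner zeroing double loop: for i in range(len(array)): for j in range(len(array[i])): array[i][1] = 0
def pvZeroAll (a : List (List Int)) : List (List Int) :=
  (List.range a.length).foldl (fun acc i =>
    (List.range (acc.getD i []).length).foldl (fun acc2 _j => pvSetZero acc2 i) acc) a

-- the j-loop body/state: state = (array, current value of variable i);
-- the zeroing loop reassigns i, leaving i = len(array)-1 (unchanged if array is empty)
def pvInner (min_elem : Int) (rowLen : Nat) (s : List (List Int) × Nat) : List (List Int) × Nat :=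
  (List.range rowLen).foldl (fun t _j =>
    if (t.1.getD t.2 []).getD 1 0 = min_elem then
      (pvZeroAll t.1, if t.1.length = 0 then t.2 else t.1.length - 1)
    else t) s

def solve_task (array : List (List Int)) (min_elem : Int) : List (List Int) :=
  ((List.range array.length).foldl (fun s i =>
      pvInner min_elem ((s.1.getD i []).length) (s.1, i)) (array, 0)).1

-- ===== PORT B =====
def solve_task_alt (array : List (List Int)) (min_elem : Int) : List (List Int) :=
  if array.any (fun row => decide (1 < row.length) && decide (row.getD 1 0 = min_elem)) then
    array.map (fun row => if 1 < row.length then row.set 1 0 else row)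
  else array

-- ===== PRECONDITION & SPEC =====
-- Pre_ excludes exactly the inputs on which Python A raises IndexError: a row of length
-- exactly 1 (array[i][1] read/write fails), or a triggering row together with an empty last
-- row (the zeroing loop leaks i = len(array)-1 into the j loop's next check array[i][1]).
def Pre_solve_task (array : List (List Int)) (min_elem : Int) : Prop :=
  (∀ row ∈ array, row.length ≠ 1) ∧
  ¬ ((∃ row ∈ array, 1 < row.length ∧ row.getD 1 0 = min_elem) ∧ array.getLast? = some [])
instance (array : List (List Int)) (min_elem : Int) : Decidable (Pre_solve_task array min_elem) := by unfold Pre_solve_task; infer_instance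

def pvWitness_solve_task : List (List Int) × Int := ([[1, 2], [3, 4]], 2)

def Spec_solve_task (array : List (List Int)) (min_elem : Int) (out : List (List Int)) : Prop := out = solve_task_alt array min_elem
instance (array : List (List Int)) (min_elem : Int) (out : List (List Int)) : Decidable (Spec_solve_task array min_elem out) := by unfold Spec_solve_task; infer_instance

-- ===== CLAIM (what is proved, stated in full; the proofs are below) =====
def Claim_equal_solve_task : Prop := ∀ (array : List (List Int)) (min_elem : Int), Dom_solve_task array min_elem → Pre_solve_task array min_elem → Spec_solve_task array min_elem (solve_task array min_elem)

-- ===== LEMMAS AND PROOFS =====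

-- proof helpers
def pvF (row : List Int) : List Int := row.set 1 0

theorem pv_fold_inv {A B : Type} (step : A → B → A) (Q : A → Prop)
    (h : ∀ t b, Q t → Q (step t b)) : ∀ (l : List B) (t : A), Q t → Q (l.foldl step t) := by
  intro l
  induction l with
  | nil => intro t ht; exact ht
  | cons b l ih => intro t ht; exact ih _ (h t b ht)

theorem pv_setZero_idem (a : List (List Int)) (i : Nat) :
    pvSetZero (pvSetZero a i) i = pvSetZero a i := by
  unfold pvSetZero
  by_cases hi : i < a.length
  · simp [List.getD, hi, List.set_set]
  · have h1 : a.set i ((a.getD i []).set 1 0) = a := List.set_eq_of_length_le (by omega)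
    rw [h1]; exact h1

theorem pv_foldl_const_idem {A : Type} (g : A → A) (h : ∀ x, g (g x) = g x) :
    ∀ (m : Nat) (x : A), (List.range (m+1)).foldl (fun y _ => g y) x = g x := by
  intro m
  induction m with
  | zero => intro x; simp
  | succ m ih => intro x; rw [List.range_succ, List.foldl_append, ih]; simp [h]

theorem pvF_idem (r : List Int) : pvF (pvF r) = pvF r := by
  unfold pvF
  rw [List.set_set]

theorem pv_zeroAll_eq (a : List (List Int)) : pvZeroAll a = a.map pvF := by
  unfold pvZeroAll
  have key : ∀ k, k ≤ a.length →
      (List.range k).foldl (fun acc i =>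
        (List.range (acc.getD i []).length).foldl (fun acc2 _j => pvSetZero acc2 i) acc) a
      = (a.take k).map pvF ++ a.drop k := by
    intro k
    induction k with
    | zero => simp
    | succ k ih =>
      intro hk
      have hk' : k < a.length := by omega
      rw [List.range_succ, List.foldl_append, ih (by omega)]
      have hlenP : ((a.take k).map pvF).length = k := by
        simp [List.length_take, Nat.min_eq_left (le_of_lt hk')]
      have hdrop : a.drop k = a[k] :: a.drop (k+1) := List.drop_eq_getElem_cons hk'
      set P := (a.take k).map pvF with hP
      have hget : (P ++ a.drop k).getD k [] = a[k] := by
        rw [hdrop, List.getD, List.getElem?_append_right (by omega), hlenP]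
        simp [List.getElem?_eq_getElem hk']
      have hset : pvSetZero (P ++ a.drop k) k = P ++ pvF a[k] :: a.drop (k+1) := by
        unfold pvSetZero
        rw [hget, hdrop, List.set_append_right k _ (by omega), hlenP]
        simp only [Nat.sub_self]
        rw [List.set_cons_zero]
        simp [pvF]
      have htake : a.take (k+1) = a.take k ++ [a[k]] := by
        rw [List.take_add_one]
        simp [List.getElem?_eq_getElem hk']
      have hRHS : (a.take (k+1)).map pvF ++ a.drop (k+1) = P ++ pvF a[k] :: a.drop (k+1) := by
        rw [htake, List.map_append]
        simp [hP]
      simp only [List.foldl_cons, List.foldl_nil]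
      rw [hget]
      cases hm : a[k].length with
      | zero =>
        have hnil : a[k] = [] := List.eq_nil_of_length_eq_zero hm
        simp only [List.range_zero, List.foldl_nil]
        rw [hRHS, hdrop, hnil]
        simp [pvF]
      | succ m' =>
        rw [pv_foldl_const_idem (fun x => pvSetZero x k) (fun x => pv_setZero_idem x k) m']
        rw [hset, hRHS]
  have := key a.length (le_refl _)
  simpa using this

theorem pv_map_pvF_idem (a : List (List Int)) : (a.map pvF).map pvF = a.map pvF := by
  rw [List.map_map]
  apply List.map_congr_left
  intro r _
  exact pvF_idem r

theorem pv_innerstep_keeps (min_elem : Int) (a : List (List Int)) :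
    ∀ (l : List Nat) (t : List (List Int) × Nat), t.1 = a.map pvF →
    ((l.foldl (fun t _j =>
        if (t.1.getD t.2 []).getD 1 0 = min_elem then
          (pvZeroAll t.1, if t.1.length = 0 then t.2 else t.1.length - 1)
        else t) t).1 = a.map pvF) := by
  intro l t ht
  refine pv_fold_inv _ (fun t => t.1 = a.map pvF) ?_ l t ht
  intro t' b ht'
  by_cases h : (t'.1.getD t'.2 []).getD 1 0 = min_elem
  · simp only [h, if_pos]
    rw [ht', pv_zeroAll_eq, pv_map_pvF_idem]
  · simp only [h, if_neg, not_false_iff]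
    exact ht'

theorem pv_inner_keeps (min_elem : Int) (m : Nat) (a : List (List Int))
    (t : List (List Int) × Nat) (ht : t.1 = a.map pvF) :
    (pvInner min_elem m t).1 = a.map pvF := by
  unfold pvInner
  exact pv_innerstep_keeps min_elem a _ t ht

theorem pv_main (min_elem : Int) (a : List (List Int)) (hP : ∀ row ∈ a, row.length ≠ 1) :
    ∀ k, k ≤ a.length →
    ((List.range k).foldl (fun s i =>
        pvInner min_elem ((s.1.getD i []).length) (s.1, i)) (a, 0)).1
    = if (a.take k).any (fun row => decide (1 < row.length) && decide (row.getD 1 0 = min_elem))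
        then a.map pvF else a := by
  intro k
  induction k with
  | zero => simp
  | succ k ih =>
    intro hk
    have hk' : k < a.length := by omega
    rw [List.range_succ, List.foldl_append]
    have htake : a.take (k+1) = a.take k ++ [a[k]] := by
      rw [List.take_add_one]; simp [List.getElem?_eq_getElem hk']
    set F := (List.range k).foldl (fun s i =>
        pvInner min_elem ((s.1.getD i []).length) (s.1, i)) (a, 0) with hF
    have h1 := ih (by omega)
    simp only [List.foldl_cons, List.foldl_nil]
    by_cases c : (a.take k).any (fun row => decide (1 < row.length) && decide (row.getD 1 0 = min_elem))
    · -- already triggered: F.1 = Z a, inner keeps it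
      rw [c] at h1
      simp only [if_pos] at h1
      rw [htake, List.any_append]
      simp only [c, Bool.true_or, if_pos]
      exact pv_inner_keeps min_elem _ a (F.1, k) h1
    · rw [if_neg c] at h1
      have hc : ((a.take k).any fun row => decide (1 < row.length) && decide (row.getD 1 0 = min_elem)) = false :=
        Bool.eq_false_iff.mpr c
      have hgd : F.1.getD k [] = a[k] := by
        rw [h1]; simp [List.getD, List.getElem?_eq_getElem hk']
      rw [htake, List.any_append, hc, Bool.false_or]
      simp only [List.any_cons, List.any_nil, Bool.or_false]
      have hmem : a[k] ∈ a := List.getElem_mem hk'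
      cases hm : a[k].length with
      | zero =>
        have hnil : a[k] = [] := List.eq_nil_of_length_eq_zero hm
        rw [hgd, hm]
        unfold pvInner
        simp [h1, hnil]
      | succ m' =>
        have hm2 : 1 < a[k].length := by
          have := hP a[k] hmem
          omega
        by_cases hv : a[k].getD 1 0 = min_elem
        · -- trigger at row k
          have hvg : a[k][1] = min_elem := by
            simpa [List.getD, List.getElem?_eq_getElem hm2] using hv
          have hm1 : 1 < m' + 1 := hm ▸ hm2
          have hcond2 : (decide (1 < m' + 1) && decide (a[k].getD 1 0 = min_elem)) = true := by
            simp [hm1, List.getD, List.getElem?_eq_getElem hm2, hvg]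
          rw [hcond2, if_pos rfl]
          rw [hgd, hm]
          unfold pvInner
          rw [List.range_succ_eq_map, List.foldl_cons]
          have hcond : ((F.1.getD k []).getD 1 0 = min_elem) := by rw [hgd]; exact hv
          simp only [hcond, if_pos]
          apply pv_innerstep_keeps min_elem a
          simp only [h1]
          rw [pv_zeroAll_eq]
        · -- no trigger at row k: state fixed at (F.1, k) = (a, k)
          have hv' : ¬ a[k][1]?.getD 0 = min_elem := by simpa [List.getD] using hv
          have : (decide (1 < m' + 1) && decide (a[k].getD 1 0 = min_elem)) = false := by
            simp [hv']
          rw [this]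
          simp only [Bool.false_eq_true, if_false]
          rw [hgd, hm]
          unfold pvInner
          have hfix : (List.range (m'+1)).foldl (fun t _j =>
              if (t.1.getD t.2 []).getD 1 0 = min_elem then
                (pvZeroAll t.1, if t.1.length = 0 then t.2 else t.1.length - 1)
              else t) (F.1, k) = (F.1, k) := by
            refine pv_fold_inv _ (fun t => t = (F.1, k)) ?_ _ _ rfl
            intro t b ht
            subst ht
            have hgd' : F.1[k]?.getD [] = a[k] := by simpa [List.getD] using hgd
            have hcnot : ¬ ((F.1, k).1.getD (F.1, k).2 []).getD 1 0 = min_elem := by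
              simpa [List.getD, hgd'] using hv'
            rw [if_neg hcnot]
          rw [hfix, h1]

theorem pv_alt_map (a : List (List Int)) :
    (a.map fun row => if 1 < row.length then row.set 1 0 else row) = a.map pvF := by
  apply List.map_congr_left
  intro r _
  by_cases h : 1 < r.length
  · simp [pvF, h]
  · simp only [h, if_neg, not_false_iff, pvF]
    rw [List.set_eq_of_length_le (by omega)]

-- ===== VERDICT (by name: the statement is the Claim_ definition above) =====
theorem solve_task_spec : Claim_equal_solve_task := by
  intro array min_elem _ hpre
  unfold Spec_solve_task solve_task solve_task_alt
  have h := pv_main min_elem array hpre.1 array.length (le_refl _)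
  rw [List.take_length] at h
  rw [h]
  by_cases c : (array.any fun row => decide (1 < row.length) && decide (row.getD 1 0 = min_elem)) = true
  · rw [if_pos c, if_pos c, pv_alt_map]
  · rw [if_neg c, if_neg c]
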